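-- pv_equiv track=rewrite | github.com/BrunoGilRamirez/Tecnicas_de_Inteligencia_Artificial | Busquedas_Ciegas/Problema_8reinas/ochoReinas-vFinal/main.py | func_sucesora
-- ===== SOURCE A (Python) =====
-- def func_sucesora(vector: list[int]) -> list[list[int]]:
--     """
--     Función que genera los sucesores del vector dado
--
--     :param vector: Vector a revisar
--     :type vector: list[int]
--     :return: Lista resultante de sucesores del vector dado
--     """
--
--     hijos = []
--
--     # for i in range(8, 0, -1):
--     for i in range(1, 9):
--         skip = False
--         copia_vector = vector.copy()
--
--         # Asegura que no haya una reina en la misma columna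
--         if i in vector:
--             continue
--
--         # Asegura que no haya reina posicionada en diagonal
--         for indice, v in enumerate(vector):
--             if (indice + 1) - v == (len(vector) + 1) - i:
--                 skip = True
--             if (indice + 1) + v == (len(vector) + 1) + i:
--                 skip = True
--         if skip:
--             continue
--
--         copia_vector.append(i)
--         hijos.append(copia_vector)
--
--     return hijos
-- ===== SOURCE B (Python) =====
-- def func_sucesora(vector):
--     n = len(vector)
--     forbidden = set(vector)
--     for indice, v in enumerate(vector):
--         d = n - indice
--         forbidden.add(v + d)
--         forbidden.add(v - d)
--     return [vector + [i] for i in range(1, 9) if i not in forbidden]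
-- ===== Notes on version B (the rewrite author's own statement) =====
-- stated objective: alternative
-- what changed: B precomputes one forbidden-row set (columns plus the two diagonal formulas v+(n-idx) and v-(n-idx)) in a single pass over vector, then filters candidates 1..8 against it, removing A's per-candidate diagonal scan and per-candidate vector.copy().
import Mathlib
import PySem

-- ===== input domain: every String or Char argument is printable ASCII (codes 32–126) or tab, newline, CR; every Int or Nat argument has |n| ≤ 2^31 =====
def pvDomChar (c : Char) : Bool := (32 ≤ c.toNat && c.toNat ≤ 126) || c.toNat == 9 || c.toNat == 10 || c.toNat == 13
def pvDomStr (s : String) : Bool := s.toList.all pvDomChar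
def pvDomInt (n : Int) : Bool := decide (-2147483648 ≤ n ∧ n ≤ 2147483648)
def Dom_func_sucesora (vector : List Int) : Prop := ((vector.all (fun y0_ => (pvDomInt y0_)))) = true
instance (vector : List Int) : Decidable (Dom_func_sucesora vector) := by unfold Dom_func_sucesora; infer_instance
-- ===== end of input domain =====

-- B replaces A's nested per-candidate diagonal scan by one precomputed forbidden-row set plus a single candidate pass (alternative decomposition, same cost class).

-- ===== PORT A =====
def func_sucesora (vector : List Int) : List (List Int) :=
  (PySem.List.pyRange 1 9 1).foldl (fun hijos i =>
    if vector.contains i then hijos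
    else
      let skip := (PySem.List.enumerate vector).foldl
        (fun skip p =>
          let skip := if (p.1 + 1) - p.2 = ((vector.length : Int) + 1) - i then true else skip
          let skip := if (p.1 + 1) + p.2 = ((vector.length : Int) + 1) + i then true else skip
          skip) false
      if skip then hijos else hijos ++ [vector ++ [i]]) []

-- ===== PORT B =====
def func_sucesora_alt (vector : List Int) : List (List Int) :=
  let n : Int := vector.length
  let forbidden : PySem.Set Int := (PySem.List.enumerate vector).foldl
    (fun s p => PySem.Set.add (PySem.Set.add s (p.2 + (n - p.1))) (p.2 - (n - p.1)))
    (PySem.Set.ofList vector)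
  ((PySem.List.pyRange 1 9 1).filter (fun i => !(PySem.Set.contains forbidden i))).map
    (fun i => vector ++ [i])

-- ===== PRECONDITION & SPEC =====
def Spec_func_sucesora (vector : List Int) (out : List (List Int)) : Prop := out = func_sucesora_alt vector
instance (vector : List Int) (out : List (List Int)) : Decidable (Spec_func_sucesora vector out) := by unfold Spec_func_sucesora; infer_instance

-- ===== CLAIM (what is proved, stated in full; the proofs are below) =====
def Claim_equal_func_sucesora : Prop := ∀ (vector : List Int), Dom_func_sucesora vector → Spec_func_sucesora vector (func_sucesora vector)

-- ===== LEMMAS AND PROOFS =====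

-- membership in B's forbidden set
theorem mem_forbidden_fold (l : List (Int × Int)) (s : PySem.Set Int) (n x : Int) :
    x ∈ l.foldl (fun s p => PySem.Set.add (PySem.Set.add s (p.2 + (n - p.1))) (p.2 - (n - p.1))) s ↔
      x ∈ s ∨ ∃ p ∈ l, x = p.2 + (n - p.1) ∨ x = p.2 - (n - p.1) := by
  induction l generalizing s with
  | nil => simp
  | cons q l ih =>
    simp only [List.foldl_cons, ih, PySem.Set.mem_add, List.mem_cons]
    constructor
    · rintro (((h | h) | h) | ⟨p, hp, h⟩)
      · exact Or.inl h
      · exact Or.inr ⟨q, Or.inl rfl, Or.inl h⟩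
      · exact Or.inr ⟨q, Or.inl rfl, Or.inr h⟩
      · exact Or.inr ⟨p, Or.inr hp, h⟩
    · rintro (h | ⟨p, (rfl | hp), h⟩)
      · exact Or.inl (Or.inl (Or.inl h))
      · rcases h with h | h
        · exact Or.inl (Or.inl (Or.inr h))
        · exact Or.inl (Or.inr h)
      · exact Or.inr ⟨p, hp, h⟩

-- A's inner skip fold is an 'any'
theorem skip_fold_eq (l : List (Int × Int)) (L i : Int) (b : Bool) :
    l.foldl (fun skip p =>
        let skip := if (p.1 + 1) - p.2 = (L + 1) - i then true else skip
        let skip := if (p.1 + 1) + p.2 = (L + 1) + i then true else skip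
        skip) b
      = (b || l.any (fun p =>
          decide ((p.1 + 1) - p.2 = (L + 1) - i) || decide ((p.1 + 1) + p.2 = (L + 1) + i))) := by
  induction l generalizing b with
  | nil => simp
  | cons q l ih =>
    simp only [List.foldl_cons, List.any_cons, ih]
    by_cases h1 : (q.1 + 1) - q.2 = (L + 1) - i <;>
      by_cases h2 : (q.1 + 1) + q.2 = (L + 1) + i <;> simp [h1, h2]

-- pointwise: A keeps candidate i iff i is not in B's forbidden set
theorem keep_iff (vector : List Int) (i : Int) :
    ((!vector.contains i) &&
      !((PySem.List.enumerate vector).foldl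
        (fun skip p =>
          let skip := if (p.1 + 1) - p.2 = ((vector.length : Int) + 1) - i then true else skip
          let skip := if (p.1 + 1) + p.2 = ((vector.length : Int) + 1) + i then true else skip
          skip) false))
    = !(PySem.Set.contains ((PySem.List.enumerate vector).foldl
        (fun s p => PySem.Set.add (PySem.Set.add s (p.2 + ((vector.length : Int) - p.1)))
          (p.2 - ((vector.length : Int) - p.1)))
        (PySem.Set.ofList vector)) i) := by
  rw [skip_fold_eq]
  have hmem : (PySem.Set.contains ((PySem.List.enumerate vector).foldl
      (fun s p => PySem.Set.add (PySem.Set.add s (p.2 + ((vector.length : Int) - p.1)))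
        (p.2 - ((vector.length : Int) - p.1)))
      (PySem.Set.ofList vector)) i)
      = (vector.contains i ||
        (PySem.List.enumerate vector).any (fun p =>
          decide ((p.1 + 1) - p.2 = ((vector.length : Int) + 1) - i) ||
          decide ((p.1 + 1) + p.2 = ((vector.length : Int) + 1) + i))) := by
    rw [Bool.eq_iff_iff]
    simp only [PySem.Set.contains_iff, mem_forbidden_fold, PySem.Set.mem_ofList,
      Bool.or_eq_true, List.any_eq_true, List.contains_iff_mem, decide_eq_true_eq]
    constructor
    · rintro (h | ⟨p, hp, h | h⟩)
      · exact Or.inl h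
      · exact Or.inr ⟨p, hp, Or.inl (by omega)⟩
      · exact Or.inr ⟨p, hp, Or.inr (by omega)⟩
    · rintro (h | ⟨p, hp, h | h⟩)
      · exact Or.inl h
      · exact Or.inr ⟨p, hp, Or.inl (by omega)⟩
      · exact Or.inr ⟨p, hp, Or.inr (by omega)⟩
  rw [hmem]
  simp [Bool.not_or]

-- ===== VERDICT (by name: the statement is the Claim_ definition above) =====
theorem func_sucesora_spec : Claim_equal_func_sucesora := by
  intro vector _
  unfold Spec_func_sucesora func_sucesora func_sucesora_alt
  have hstep : (fun (hijos : List (List Int)) (i : Int) =>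
      if vector.contains i then hijos
      else
        let skip := (PySem.List.enumerate vector).foldl
          (fun skip p =>
            let skip := if (p.1 + 1) - p.2 = ((vector.length : Int) + 1) - i then true else skip
            let skip := if (p.1 + 1) + p.2 = ((vector.length : Int) + 1) + i then true else skip
            skip) false
        if skip then hijos else hijos ++ [vector ++ [i]])
      = (fun (hijos : List (List Int)) (i : Int) =>
          if (!(PySem.Set.contains ((PySem.List.enumerate vector).foldl
              (fun s p => PySem.Set.add (PySem.Set.add s (p.2 + ((vector.length : Int) - p.1)))
                (p.2 - ((vector.length : Int) - p.1)))
              (PySem.Set.ofList vector)) i)) = true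
          then hijos ++ [vector ++ [i]] else hijos) := by
    funext hijos i
    rw [← keep_iff vector i]
    cases hc : vector.contains i <;>
      cases hs : (PySem.List.enumerate vector).foldl
          (fun skip p =>
            let skip := if (p.1 + 1) - p.2 = ((vector.length : Int) + 1) - i then true else skip
            let skip := if (p.1 + 1) + p.2 = ((vector.length : Int) + 1) + i then true else skip
            skip) false <;>
        simp [hc, hs]
  rw [hstep, PySem.List.foldl_append_if]
  simp
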